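-- pv_equiv track=rewrite | github.com/Semeriuss/A2SV-Labs | contest_problems/code_forces_22/D.py | solve
-- ===== SOURCE A (Python) =====
-- from collections import Counter
--
-- def solve(a):
--     freq = Counter(list(d%10 for d in a))
--     for i in range(10):
--         if freq[i] == 0: continue
--         freq[i] -= 1
--         for j in range(10):
--             if freq[j] == 0: continue
--             freq[j] -= 1
--             for num in [3, 13, 23]:
--                 if freq[num - (i + j)]:
--                     return "YES"
--             freq[j] += 1
--         freq[i] += 1
--
--     return "NO"
-- ===== SOURCE B (Python) =====
-- def solve(a):
--     s1 = set()
--     s2 = set()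
--     s3 = set()
--     for d in a:
--         d %= 10
--         s3 |= {(s + d) % 10 for s in s2}
--         s2 |= {(s + d) % 10 for s in s1}
--         s1.add(d)
--     return "YES" if 3 in s3 else "NO"
-- ===== Notes on version B (the rewrite author's own statement) =====
-- stated objective: alternative
-- what changed: Replaces the Counter of last digits and the nested 10x10x3 scan over a mutated frequency table with a single forward DP pass maintaining the sets of subset-sums mod 10 achievable with 1, 2 and 3 elements.
import Mathlib
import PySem

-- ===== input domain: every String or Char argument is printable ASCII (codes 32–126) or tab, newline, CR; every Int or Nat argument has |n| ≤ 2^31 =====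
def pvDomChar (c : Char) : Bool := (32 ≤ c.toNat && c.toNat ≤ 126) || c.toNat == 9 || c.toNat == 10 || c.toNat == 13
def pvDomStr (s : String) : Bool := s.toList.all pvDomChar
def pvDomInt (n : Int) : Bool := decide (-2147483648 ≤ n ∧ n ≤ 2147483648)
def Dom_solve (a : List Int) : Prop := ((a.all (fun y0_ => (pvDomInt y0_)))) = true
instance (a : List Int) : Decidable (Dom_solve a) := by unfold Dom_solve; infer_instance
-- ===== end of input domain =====

-- B replaces A's Counter-of-last-digits plus nested 10x10x3 frequency-table scan by a one-pass
-- DP over the sets of subset-sums mod 10 achievable with 1, 2 and 3 elements (alternative algorithm).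


-- ===== PORT A =====
-- 'for num in [3, 13, 23]: if freq[num - (i + j)]: return "YES"'
def pvInner (freq : PySem.Dict Int Int) (s : Int) : Bool :=
  [(3 : Int), 13, 23].any (fun num => !(freq.getD (num - s) 0 == 0))

-- 'for j in range(10): …' with the Counter mutated (freq[j] -= 1 / += 1) threaded through
def pvJLoop (i : Int) (freq : PySem.Dict Int Int) : List Int → Bool
  | [] => false
  | j :: js =>
    if freq.getD j 0 == 0 then pvJLoop i freq js
    else
      let f1 := freq.insert j (freq.getD j 0 - 1)
      if pvInner f1 (i + j) then true
      else pvJLoop i (f1.insert j (f1.getD j 0 + 1)) js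

-- 'for i in range(10): …'
def pvILoop (freq : PySem.Dict Int Int) : List Int → Bool
  | [] => false
  | i :: is =>
    if freq.getD i 0 == 0 then pvILoop freq is
    else
      let f1 := freq.insert i (freq.getD i 0 - 1)
      if pvJLoop i f1 (PySem.List.pyRange 0 10) then true
      else pvILoop (f1.insert i (f1.getD i 0 + 1)) is

def solve (a : List Int) : String :=
  let freq := PySem.Dict.counter (a.map (fun d => PySem.Int.mod d 10))
  if pvILoop freq (PySem.List.pyRange 0 10) then "YES" else "NO"

-- ===== PORT B =====
-- one loop iteration: d %= 10; s3 |= {(s+d)%10 for s in s2}; s2 |= {(s+d)%10 for s in s1}; s1.add(d)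
def pvStep (st : PySem.Set Int × PySem.Set Int × PySem.Set Int) (d0 : Int) :
    PySem.Set Int × PySem.Set Int × PySem.Set Int :=
  let d := PySem.Int.mod d0 10
  let s3 := PySem.Set.union st.2.2 (PySem.Set.ofList (st.2.1.map (fun s => PySem.Int.mod (s + d) 10)))
  let s2 := PySem.Set.union st.2.1 (PySem.Set.ofList (st.1.map (fun s => PySem.Int.mod (s + d) 10)))
  let s1 := PySem.Set.add st.1 d
  (s1, s2, s3)

def solve_alt (a : List Int) : String :=
  let st := a.foldl pvStep (PySem.Set.empty, PySem.Set.empty, PySem.Set.empty)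
  if (3 : Int) ∈ st.2.2 then "YES" else "NO"

-- ===== PRECONDITION & SPEC =====
def Spec_solve (a : List Int) (out : String) : Prop := out = solve_alt a
instance (a : List Int) (out : String) : Decidable (Spec_solve a out) := by unfold Spec_solve; infer_instance

-- ===== CLAIM (what is proved, stated in full; the proofs are below) =====
def Claim_equal_solve : Prop := ∀ (a : List Int), Dom_solve a → Spec_solve a (solve a)

-- ===== LEMMAS AND PROOFS =====

-- the list of last digits (Python '%': floor mod, here with positive divisor 10)
def pvDigs (p : List Int) : List Int := p.map (fun d => PySem.Int.mod d 10)

-- "v is the mod-10 sum of some k elements picked at distinct positions of p"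
def SubV (p : List Int) (k : Nat) (v : Int) : Prop :=
  ∃ t : List Int, t.Sublist (pvDigs p) ∧ t.length = k ∧ PySem.Int.mod t.sum 10 = v

-- pure image of A's mutated Counter: decrement the count at one key
def pvDec (c : Int → Int) (t : Int) : Int → Int := fun x => if x = t then c t - 1 else c x

def pvInnerC (c : Int → Int) (s : Int) : Bool :=
  [(3 : Int), 13, 23].any (fun num => !(c (num - s) == 0))

def pvJB (c : Int → Int) (i j : Int) : Bool :=
  !(c j == 0) && pvInnerC (pvDec c j) (i + j)

def pvIB (c : Int → Int) (i : Int) : Bool :=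
  !(c i == 0) && (PySem.List.pyRange 0 10).any (pvJB (pvDec c i) i)

lemma pvMod10_nonneg (x : Int) : 0 ≤ PySem.Int.mod x 10 := PySem.Int.mod_nonneg x (by norm_num)
lemma pvMod10_lt (x : Int) : PySem.Int.mod x 10 < 10 := PySem.Int.mod_lt x (by norm_num)

lemma pvMod10_emod (x : Int) : PySem.Int.mod x 10 = x % 10 :=
  PySem.Int.mod_eq_emod_of_pos (by norm_num)

lemma pvMod10_add_left (x y : Int) :
    PySem.Int.mod (PySem.Int.mod x 10 + y) 10 = PySem.Int.mod (x + y) 10 := by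
  rw [pvMod10_emod, pvMod10_emod (x+y), pvMod10_emod x, Int.emod_add_emod]

-- getD of a decremented Counter is pvDec of its getD
lemma pvGetD_dec (d : PySem.Dict Int Int) (j x : Int) :
    (d.insert j (d.getD j 0 - 1)).getD x 0 = pvDec (fun y => d.getD y 0) j x := by
  simp [PySem.Dict.getD_insert, pvDec]

lemma pvGetD_restore (d : PySem.Dict Int Int) (j x : Int) :
    (d.insert j (d.getD j 0)).getD x 0 = d.getD x 0 := by
  rw [PySem.Dict.getD_insert]; split <;> simp_all

lemma pvInner_eq (f : PySem.Dict Int Int) (s : Int) :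
    pvInner f s = pvInnerC (fun y => f.getD y 0) s := rfl

lemma pvJLoop_eq (js : List Int) (i : Int) : ∀ (d : PySem.Dict Int Int),
    pvJLoop i d js = js.any (fun j => pvJB (fun y => d.getD y 0) i j) := by
  induction js with
  | nil => intro d; simp [pvJLoop]
  | cons j js ih =>
    intro d
    simp only [pvJLoop, List.any_cons]
    by_cases h : d.getD j 0 = 0
    · simp [pvJB, h, ih d]
    · rw [if_neg (by simpa using h)]
      have hdec : (fun y => (d.insert j (d.getD j 0 - 1)).getD y 0)
          = pvDec (fun y => d.getD y 0) j := funext (pvGetD_dec d j)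
      have hjb : pvJB (fun y => d.getD y 0) i j
          = pvInner (d.insert j (d.getD j 0 - 1)) (i + j) := by
        rw [pvInner_eq, hdec, pvJB]
        simp [h]
      by_cases h2 : pvInner (d.insert j (d.getD j 0 - 1)) (i + j) = true
      · rw [if_pos h2, hjb, h2, Bool.true_or]
      · rw [if_neg h2]
        have hrest : (d.insert j (d.getD j 0 - 1)).insert j
            ((d.insert j (d.getD j 0 - 1)).getD j 0 + 1) = d.insert j (d.getD j 0) := by
          rw [PySem.Dict.getD_insert_self, PySem.Dict.insert_insert_self]
          norm_num
        rw [hrest, ih, hjb, Bool.eq_false_iff.mpr h2, Bool.false_or]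
        congr 1
        funext j'
        congr 1
        exact funext (pvGetD_restore d j)

lemma pvILoop_eq (is : List Int) : ∀ (d : PySem.Dict Int Int),
    pvILoop d is = is.any (fun i => pvIB (fun y => d.getD y 0) i) := by
  induction is with
  | nil => intro d; simp [pvILoop]
  | cons i is ih =>
    intro d
    simp only [pvILoop, List.any_cons]
    by_cases h : d.getD i 0 = 0
    · simp [pvIB, h, ih d]
    · rw [if_neg (by simpa using h)]
      have hdec : (fun y => (d.insert i (d.getD i 0 - 1)).getD y 0)
          = pvDec (fun y => d.getD y 0) i := funext (pvGetD_dec d i)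
      have hib : pvIB (fun y => d.getD y 0) i
          = pvJLoop i (d.insert i (d.getD i 0 - 1)) (PySem.List.pyRange 0 10) := by
        rw [pvJLoop_eq, pvIB, hdec]
        simp [h]
      by_cases h2 : pvJLoop i (d.insert i (d.getD i 0 - 1)) (PySem.List.pyRange 0 10) = true
      · rw [if_pos h2, hib, h2, Bool.true_or]
      · rw [if_neg h2]
        have hrest : (d.insert i (d.getD i 0 - 1)).insert i
            ((d.insert i (d.getD i 0 - 1)).getD i 0 + 1) = d.insert i (d.getD i 0) := by
          rw [PySem.Dict.getD_insert_self, PySem.Dict.insert_insert_self]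
          norm_num
        rw [hrest, ih, hib, Bool.eq_false_iff.mpr h2, Bool.false_or]
        congr 1
        funext i'
        congr 1
        exact funext (pvGetD_restore d i)

-- ===== A-side: the digit loops succeed iff some 3 positions sum to ≡ 3 (mod 10) =====
lemma pvDigs_bounds {a : List Int} {u : Int} (h : u ∈ pvDigs a) : 0 ≤ u ∧ u < 10 := by
  simp only [pvDigs, List.mem_map] at h
  obtain ⟨d, -, rfl⟩ := h
  exact ⟨pvMod10_nonneg d, pvMod10_lt d⟩

lemma pvA_build (a : List Int) (i j k : Int)
    (H : ∀ w, List.count w [i, j, k] ≤ List.count w (pvDigs a))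
    (hsum : PySem.Int.mod (i + j + k) 10 = 3) : SubV a 3 3 := by
  have hsp : [i, j, k].Subperm (pvDigs a) :=
    List.subperm_ext_iff.mpr (fun w _ => H w)
  obtain ⟨t, hperm, hsub⟩ := hsp
  refine ⟨t, hsub, by simp [hperm.length_eq], ?_⟩
  rw [hperm.sum_eq]
  simpa [add_assoc] using hsum

lemma pvA_iff (a : List Int) :
    ((PySem.List.pyRange 0 10).any
      (fun i => pvIB (fun y => ((pvDigs a).count y : Int)) i)) = true ↔ SubV a 3 3 := by
  simp only [List.any_eq_true, pvIB, pvJB, pvInnerC, pvDec, Bool.and_eq_true,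
    Bool.not_eq_true', beq_eq_false_iff_ne, ne_eq, PySem.List.mem_pyRange_one,
    List.mem_cons, List.not_mem_nil, or_false]
  constructor
  · rintro ⟨i, ⟨hi0, hi9⟩, hci, j, ⟨hj0, hj9⟩, hcj, num, hnum, hck⟩
    set k : Int := num - (i + j) with hk
    have hsum : PySem.Int.mod (i + j + k) 10 = 3 := by
      have he : i + j + k = num := by omega
      rw [he]
      rcases hnum with rfl | rfl | rfl <;> decide
    refine pvA_build a i j k ?_ hsum
    intro w
    simp only [List.count_cons, List.count_nil, beq_iff_eq, Nat.zero_add] at *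
    split_ifs at hcj hck ⊢ <;> subst_vars <;> omega
  · rintro ⟨t, hsub, hlen, hmod⟩
    rcases t with - | ⟨x, - | ⟨y, - | ⟨z, - | ⟨w, t⟩⟩⟩⟩ <;> simp at hlen
    have hx : 0 ≤ x ∧ x < 10 := pvDigs_bounds (hsub.subset (by simp : x ∈ [x, y, z]))
    have hy : 0 ≤ y ∧ y < 10 := pvDigs_bounds (hsub.subset (by simp : y ∈ [x, y, z]))
    have hz : 0 ≤ z ∧ z < 10 := pvDigs_bounds (hsub.subset (by simp : z ∈ [x, y, z]))
    have Hx := List.Sublist.count_le x hsub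
    have Hy := List.Sublist.count_le y hsub
    have Hz := List.Sublist.count_le z hsub
    rw [pvMod10_emod] at hmod
    simp only [List.sum_cons, List.sum_nil, add_zero] at hmod
    have hnum : x + y + z = 3 ∨ x + y + z = 13 ∨ x + y + z = 23 := by omega
    refine ⟨x, ⟨hx.1, hx.2⟩, ?_, y, ⟨hy.1, hy.2⟩, ?_, x + y + z, hnum, ?_⟩
    · simp only [List.count_cons, List.count_nil, beq_iff_eq, Nat.zero_add] at Hx
      split_ifs at Hx <;> omega
    · simp only [List.count_cons, List.count_nil, beq_iff_eq, Nat.zero_add] at Hx Hy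
      split_ifs at Hx Hy ⊢ <;> subst_vars <;> omega
    · rw [show x + y + z - (x + y) = z from by ring]
      simp only [List.count_cons, List.count_nil, beq_iff_eq, Nat.zero_add] at Hx Hy Hz
      split_ifs at Hx Hy Hz ⊢ <;> subst_vars <;> omega

-- ===== B-side: the DP invariant =====
def pvInvB (p : List Int) (st : PySem.Set Int × PySem.Set Int × PySem.Set Int) : Prop :=
  (∀ v, v ∈ st.1 ↔ SubV p 1 v) ∧ (∀ v, v ∈ st.2.1 ↔ SubV p 2 v) ∧ (∀ v, v ∈ st.2.2 ↔ SubV p 3 v)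

lemma pvSubV_zero (p : List Int) (v : Int) : SubV p 0 v ↔ v = 0 := by
  constructor
  · rintro ⟨t, -, hlen, hmod⟩
    rw [List.length_eq_zero_iff] at hlen
    subst hlen
    simpa using hmod.symm
  · rintro rfl
    exact ⟨[], List.nil_sublist _, rfl, by decide⟩

lemma pvDigs_append (p : List Int) (d : Int) :
    pvDigs (p ++ [d]) = pvDigs p ++ [PySem.Int.mod d 10] := by
  simp [pvDigs]

lemma pvSubV_append (p : List Int) (d : Int) (k : Nat) (v : Int) :
    SubV (p ++ [d]) (k + 1) v ↔
      SubV p (k + 1) v ∨ ∃ w, SubV p k w ∧ v = PySem.Int.mod (w + PySem.Int.mod d 10) 10 := by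
  constructor
  · rintro ⟨t, hsub, hlen, hmod⟩
    rw [pvDigs_append] at hsub
    rcases List.sublist_append_iff.mp hsub with ⟨r1, r2, rfl, hr1, hr2⟩
    rcases List.sublist_singleton.mp hr2 with rfl | rfl
    · exact Or.inl ⟨r1, by simpa using hr1, by simpa using hlen, by simpa using hmod⟩
    · refine Or.inr ⟨PySem.Int.mod r1.sum 10, ⟨r1, hr1, by simpa using hlen, rfl⟩, ?_⟩
      rw [pvMod10_add_left, ← hmod]
      simp
  · rintro (⟨t, hsub, hlen, hmod⟩ | ⟨w, ⟨t, hsub, hlen, rfl⟩, rfl⟩)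
    · exact ⟨t, hsub.trans (by rw [pvDigs_append]; exact List.sublist_append_left _ _),
        hlen, hmod⟩
    · refine ⟨t ++ [PySem.Int.mod d 10], ?_, by simpa using hlen, ?_⟩
      · rw [pvDigs_append]
        exact hsub.append (List.Sublist.refl _)
      · rw [pvMod10_add_left]
        simp

lemma pvSubV_append1 (p : List Int) (d v : Int) :
    SubV (p ++ [d]) 1 v ↔ SubV p 1 v ∨ v = PySem.Int.mod d 10 := by
  refine (pvSubV_append p d 0 v).trans ?_
  simp [pvSubV_zero]

lemma pvSubV_append2 (p : List Int) (d v : Int) :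
    SubV (p ++ [d]) 2 v ↔
      SubV p 2 v ∨ ∃ w, SubV p 1 w ∧ v = PySem.Int.mod (w + PySem.Int.mod d 10) 10 := by
  exact pvSubV_append p d 1 v

lemma pvSubV_append3 (p : List Int) (d v : Int) :
    SubV (p ++ [d]) 3 v ↔
      SubV p 3 v ∨ ∃ w, SubV p 2 w ∧ v = PySem.Int.mod (w + PySem.Int.mod d 10) 10 := by
  exact pvSubV_append p d 2 v

lemma pvInvB_step (p : List Int) (st : PySem.Set Int × PySem.Set Int × PySem.Set Int) (d : Int)
    (h : pvInvB p st) : pvInvB (p ++ [d]) (pvStep st d) := by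
  obtain ⟨s1, s2, s3⟩ := st
  obtain ⟨h1, h2, h3⟩ := h
  refine ⟨fun v => ?_, fun v => ?_, fun v => ?_⟩
  · rw [pvStep]
    simp only [PySem.Set.mem_add, pvSubV_append1, h1]
  · rw [pvStep]
    simp only [PySem.Set.mem_union, PySem.Set.mem_ofList, List.mem_map, pvSubV_append2, h2]
    constructor
    · rintro (hv | ⟨w, hw, rfl⟩)
      · exact Or.inl hv
      · exact Or.inr ⟨w, (h1 w).mp hw, rfl⟩
    · rintro (hv | ⟨w, hw, rfl⟩)
      · exact Or.inl hv
      · exact Or.inr ⟨w, (h1 w).mpr hw, rfl⟩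
  · rw [pvStep]
    simp only [PySem.Set.mem_union, PySem.Set.mem_ofList, List.mem_map, pvSubV_append3, h3]
    constructor
    · rintro (hv | ⟨w, hw, rfl⟩)
      · exact Or.inl hv
      · exact Or.inr ⟨w, (h2 w).mp hw, rfl⟩
    · rintro (hv | ⟨w, hw, rfl⟩)
      · exact Or.inl hv
      · exact Or.inr ⟨w, (h2 w).mpr hw, rfl⟩

lemma pvInvB_foldl (l : List Int) : ∀ (p : List Int) st,
    pvInvB p st → pvInvB (p ++ l) (l.foldl pvStep st) := by
  induction l with
  | nil => intro p st h; simpa using h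
  | cons d l ih =>
    intro p st h
    have h2 := ih (p ++ [d]) (pvStep st d) (pvInvB_step p st d h)
    rw [List.foldl_cons]
    rw [List.append_cons]
    exact h2

lemma pvSubV_nil (k : Nat) (v : Int) : ¬ SubV [] (k + 1) v := by
  rintro ⟨t, hsub, hlen, -⟩
  have ht : t = [] := List.sublist_nil.mp hsub
  subst ht
  simp at hlen

lemma pvB_iff (a : List Int) :
    ((3 : Int) ∈ (a.foldl pvStep (PySem.Set.empty, PySem.Set.empty, PySem.Set.empty)).2.2) ↔
      SubV a 3 3 := by
  have h0 : pvInvB [] (PySem.Set.empty, PySem.Set.empty, PySem.Set.empty) := by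
    refine ⟨fun v => ?_, fun v => ?_, fun v => ?_⟩ <;>
      simp [PySem.Set.empty, pvSubV_nil 0, pvSubV_nil 1, pvSubV_nil 2]
  have h := (pvInvB_foldl a [] _ h0).2.2 3
  simpa using h

-- ===== VERDICT (by name: the statement is the Claim_ definition above) =====
theorem solve_spec : Claim_equal_solve := by
  intro a _
  unfold Spec_solve
  simp only [solve, solve_alt]
  rw [pvILoop_eq]
  have hc : (fun y => (PySem.Dict.counter (List.map (fun d => PySem.Int.mod d 10) a)).getD y 0)
      = (fun y => (((pvDigs a).count y : Nat) : Int)) := by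
    funext y; simp [pvDigs, PySem.Dict.getD_counter]
  rw [hc]
  by_cases h : SubV a 3 3
  · rw [if_pos ((pvA_iff a).mpr h), if_pos ((pvB_iff a).mpr h)]
  · rw [if_neg (fun hm => h ((pvA_iff a).mp hm)), if_neg (fun hm => h ((pvB_iff a).mp hm))]
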